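-- pv_equiv track=rewrite | github.com/maxuebing/copaw-wechat | wecom/utils.py | normalize_markdown
-- ===== SOURCE A (Python) =====
-- def normalize_markdown(text: str) -> str:
--     """标准化 Markdown 格式（适配企业微信）
--
--     Args:
--         text: 原始 Markdown 文本
--
--     Returns:
--         标准化后的 Markdown 文本
--     """
--     # 企业微信 Markdown 支持的子集
--     # 标题、加粗、链接、行内代码、引用、字体颜色
--
--     # 确保标题前有空格
--     lines = text.split("\n")
--     result = []
--
--     for line in lines:
--         stripped = line.lstrip()
--         if stripped.startswith("#"):
--             # 计算井号数量
--             num_hash = len(line) - len(line.lstrip("#"))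
--             if num_hash > 0 and num_hash <= 6:
--                 if len(line) > num_hash and line[num_hash] != " ":
--                     line = "#" * num_hash + " " + line[num_hash:]
--
--         result.append(line)
--
--     return "\n".join(result)
-- ===== SOURCE B (Python) =====
-- def normalize_markdown(text: str) -> str:
--     """Single state-machine pass over the characters; no line list is built."""
--     out = []
--     i, n = 0, len(text)
--     at_line_start = True
--     while i < n:
--         if at_line_start:
--             j = i
--             while j < n and text[j] == '#':
--                 j += 1
--             k = j - i
--             out.append(text[i:j])
--             if 1 <= k <= 6 and j < n and text[j] != ' ' and text[j] != '\n':
--                 out.append(' ')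
--             i = j
--             at_line_start = False
--         else:
--             c = text[i]
--             out.append(c)
--             at_line_start = (c == '\n')
--             i += 1
--     return ''.join(out)
-- ===== Notes on version B (the rewrite author's own statement) =====
-- stated objective: alternative
-- what changed: Replaces split-into-lines / per-line lstrip-and-count / join with a single character-level state-machine pass that counts hashes only at line starts and never builds a line list.
import Mathlib
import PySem

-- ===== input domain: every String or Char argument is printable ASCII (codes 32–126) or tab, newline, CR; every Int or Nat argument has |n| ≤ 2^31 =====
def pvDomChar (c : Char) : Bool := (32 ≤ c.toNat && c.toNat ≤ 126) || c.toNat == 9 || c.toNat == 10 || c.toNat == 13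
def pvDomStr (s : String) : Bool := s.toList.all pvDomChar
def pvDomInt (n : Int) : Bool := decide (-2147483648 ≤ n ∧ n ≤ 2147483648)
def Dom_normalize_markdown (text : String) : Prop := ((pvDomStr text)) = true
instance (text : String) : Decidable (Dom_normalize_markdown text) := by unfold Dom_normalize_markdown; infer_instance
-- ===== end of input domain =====

-- B replaces A's split-into-lines / per-line fix / join with one character-level state-machine pass (alternative structure, same cost).

-- ===== PORT A =====
-- per-line body of A's for-loop
def fixLineA (line : List Char) : List Char :=
  let stripped := PySem.Chars.lstrip line
  if PySem.Chars.startswith stripped ['#'] then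
    -- line.lstrip("#") ported by hand as dropWhile (exact: lstrip with a char set drops exactly the leading chars of that set)
    let numHash : Nat := line.length - (line.dropWhile (· == '#')).length
    if 0 < numHash ∧ numHash ≤ 6 then
      if numHash < line.length ∧ PySem.List.pyGet? line (numHash : Int) ≠ some ' ' then
        List.replicate numHash '#' ++ [' '] ++ PySem.List.slice line (some (numHash : Int)) none
      else line
    else line
  else line

def normalize_markdown (text : String) : String :=
  let lines := PySem.Chars.splitOn text.toList ['\n']
  let result := lines.foldl (fun acc line => acc ++ [fixLineA line]) ([] : List (List Char))
  String.ofList (PySem.Chars.join ['\n'] result)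

-- ===== PORT B =====
-- 1 <= k <= 6 guard's tail: next char exists and is neither ' ' nor '\n'
def headOkB : List Char → Bool
  | [] => false
  | c :: _ => c != ' ' && c != '\n'

mutual
-- state at_line_start = True: scan the hash run, maybe emit a space
def goB (cs : List Char) : List Char :=
  let hs := cs.takeWhile (· == '#')
  let rest := cs.dropWhile (· == '#')
  hs ++ (if 1 ≤ hs.length ∧ hs.length ≤ 6 ∧ headOkB rest = true then [' '] else []) ++ emitB rest
termination_by (cs.length, 1)
decreasing_by
  rcases lt_or_eq_of_le (List.length_dropWhile_le (· == '#') cs) with h' | h'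
  · exact Prod.Lex.left _ _ h'
  · exact h' ▸ Prod.Lex.right _ (by omega)
-- state at_line_start = False: copy chars, back to line-start state after '\n'
def emitB : List Char → List Char
  | [] => []
  | c :: cs => if c = '\n' then c :: goB cs else c :: emitB cs
termination_by cs => (cs.length, 0)
decreasing_by
  · exact Prod.Lex.left _ _ (by simp)
  · exact Prod.Lex.left _ _ (by simp)
end

def normalize_markdown_alt (text : String) : String :=
  String.ofList (goB text.toList)


-- ===== PRECONDITION & SPEC =====
def Spec_normalize_markdown (text : String) (out : String) : Prop := out = normalize_markdown_alt text
instance (text : String) (out : String) : Decidable (Spec_normalize_markdown text out) := by unfold Spec_normalize_markdown; infer_instance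

-- ===== CLAIM (what is proved, stated in full; the proofs are below) =====
def Claim_equal_normalize_markdown : Prop := ∀ (text : String), Dom_normalize_markdown text → Spec_normalize_markdown text (normalize_markdown text)

-- ===== LEMMAS AND PROOFS =====

def mySplit : List Char → List (List Char)
  | [] => [[]]
  | c :: cs => if c = '\n' then [] :: mySplit cs else (mySplit cs).modifyHead (c :: ·)

theorem mySplit_ne_nil (cs : List Char) : mySplit cs ≠ [] := by
  induction cs with
  | nil => simp [mySplit]
  | cons c cs ih =>
    simp only [mySplit]
    split_ifs
    · simp
    · cases h : mySplit cs with
      | nil => exact absurd h ih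
      | cons b t => simp [List.modifyHead]

theorem go_spec (fuel : Nat) : ∀ (l cur acc : _), l.length < fuel →
    PySem.Chars.splitOn.go ['\n'] fuel l cur acc
      = acc.reverse ++ (mySplit l).modifyHead (cur.reverse ++ ·) := by
  induction fuel with
  | zero => intro l cur acc h; omega
  | succ fuel ih =>
    intro l cur acc h
    cases l with
    | nil => simp [PySem.Chars.splitOn.go, mySplit, List.modifyHead]
    | cons c rest =>
      by_cases hc : c = '\n'
      · subst hc
        rw [show PySem.Chars.splitOn.go ['\n'] (fuel+1) ('\n'::rest) cur acc
            = PySem.Chars.splitOn.go ['\n'] fuel rest [] (cur.reverse :: acc) by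
          simp [PySem.Chars.splitOn.go, List.isPrefixOf]]
        rw [ih rest [] _ (by simp at h; omega)]
        cases hm : mySplit rest <;> simp [mySplit, List.modifyHead, hm]
      · rw [show PySem.Chars.splitOn.go ['\n'] (fuel+1) (c::rest) cur acc
            = PySem.Chars.splitOn.go ['\n'] fuel rest (c :: cur) acc by
          simp [PySem.Chars.splitOn.go, List.isPrefixOf, Ne.symm hc]]
        rw [ih rest _ _ (by simp at h; omega)]
        cases hm : mySplit rest with
        | nil => exact absurd hm (mySplit_ne_nil rest)
        | cons b t => simp [mySplit, hc, hm, List.modifyHead]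

theorem splitOn_newline (s : List Char) : PySem.Chars.splitOn s ['\n'] = mySplit s := by
  unfold PySem.Chars.splitOn
  rw [go_spec _ _ _ _ (by omega)]
  cases hm : mySplit s with
  | nil => exact absurd hm (mySplit_ne_nil s)
  | cons b t => simp [List.modifyHead]

theorem foldl_append_map {α β : Type} (f : α → β) (l : List α) (acc : List β) :
    l.foldl (fun acc x => acc ++ [f x]) acc = acc ++ l.map f := by
  induction l generalizing acc with
  | nil => simp
  | cons a l ih => simp [ih]

theorem emitB_no_newline (u : List Char) (h : '\n' ∉ u) : emitB u = u := by
  induction u with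
  | nil => simp [emitB]
  | cons c cs ih =>
    simp only [List.mem_cons, not_or] at h
    simp [emitB, Ne.symm h.1, ih h.2]

theorem emitB_append (u v : List Char) (h : '\n' ∉ u) :
    emitB (u ++ '\n' :: v) = u ++ '\n' :: goB v := by
  induction u with
  | nil => simp [emitB]
  | cons c cs ih =>
    simp only [List.mem_cons, not_or] at h
    simp [emitB, Ne.symm h.1, ih h.2]

theorem mySplit_no_newline (u : List Char) (h : '\n' ∉ u) : mySplit u = [u] := by
  induction u with
  | nil => rfl
  | cons c cs ih =>
    simp only [List.mem_cons, not_or] at h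
    simp [mySplit, Ne.symm h.1, ih h.2, List.modifyHead]

theorem mySplit_append (u v : List Char) (h : '\n' ∉ u) :
    mySplit (u ++ '\n' :: v) = u :: mySplit v := by
  induction u with
  | nil => simp [mySplit]
  | cons c cs ih =>
    simp only [List.mem_cons, not_or] at h
    simp [mySplit, Ne.symm h.1, ih h.2, List.modifyHead]

theorem takeWhile_append_stop {α : Type} (p : α → Bool) (u v : List α) (x : α) (hx : ¬ p x = true) :
    (u ++ x :: v).takeWhile p = u.takeWhile p := by
  induction u with
  | nil => simp [List.takeWhile, hx]
  | cons a u ih =>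
    simp only [List.cons_append, List.takeWhile_cons]
    cases p a <;> simp [ih]

theorem dropWhile_append_stop {α : Type} (p : α → Bool) (u v : List α) (x : α) (hx : ¬ p x = true) :
    (u ++ x :: v).dropWhile p = u.dropWhile p ++ x :: v := by
  induction u with
  | nil => simp [List.dropWhile, hx]
  | cons a u ih =>
    simp only [List.cons_append, List.dropWhile_cons]
    cases p a <;> simp [ih]

theorem headOkB_append (w v : List Char) : headOkB (w ++ '\n' :: v) = headOkB w := by
  cases w <;> simp [headOkB]

theorem fixA_eq (u : List Char) (h : '\n' ∉ u) :
    fixLineA u = u.takeWhile (· == '#') ++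
      (if 1 ≤ (u.takeWhile (· == '#')).length ∧ (u.takeWhile (· == '#')).length ≤ 6 ∧
          headOkB (u.dropWhile (· == '#')) = true
       then [' '] else []) ++ u.dropWhile (· == '#') := by
  cases u with
  | nil => simp [fixLineA, PySem.Chars.lstrip, PySem.Chars.startswith, headOkB]
  | cons c t =>
    by_cases hc : c = '#'
    · subst hc
      have hsplit : ('#'::t).takeWhile (· == '#') ++ ('#'::t).dropWhile (· == '#') = '#'::t :=
        List.takeWhile_append_dropWhile
      have hlen : (('#'::t).takeWhile (· == '#')).length + (('#'::t).dropWhile (· == '#')).length = ('#'::t).length := by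
        rw [← List.length_append, hsplit]
      set k := (('#'::t).takeWhile (· == '#')).length with hk
      have hk1 : 1 ≤ k := by simp [hk]
      have hrepl : ('#'::t).takeWhile (· == '#') = List.replicate k '#' := by
        rw [List.eq_replicate_iff]
        constructor
        · rfl
        · intro b hb
          simpa using List.mem_takeWhile_imp hb
      have hnh : ('#'::t).length - (('#'::t).dropWhile (· == '#')).length = k := by omega
      have hget : PySem.List.pyGet? ('#'::t) (k : Int) = (('#'::t).dropWhile (· == '#')).head? := by
        rw [PySem.List.pyGet?_natCast]
        conv_lhs => rw [← hsplit]
        rw [List.getElem?_append_right (by omega)]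
        cases ('#'::t).dropWhile (· == '#') <;> simp [hk]
      simp only [fixLineA, PySem.Chars.lstrip, PySem.Chars.startswith]
      rw [List.dropWhile_cons_of_neg (by simp [PySem.Chars.isspace])]
      rw [if_pos (by simp [List.isPrefixOf])]
      rw [hnh, hget]
      cases hd : ('#'::t).dropWhile (· == '#') with
      | nil =>
        rw [hd] at hlen
        have hu := hsplit
        rw [hd, List.append_nil] at hu
        have hC3 : ¬ (1 ≤ k ∧ k ≤ 6 ∧ headOkB ([] : List Char) = true) := by simp [headOkB]
        rw [if_neg hC3]
        by_cases hC1 : 0 < k ∧ k ≤ 6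
        · have hC2 : ¬ (k < ('#'::t).length ∧ (([] : List Char).head? ≠ some ' ')) := by
            simp only [List.length_nil] at hlen
            exact fun hh => absurd hh.1 (by omega)
          rw [if_pos hC1, if_neg hC2]
          simp [hu]
        · rw [if_neg hC1]
          simp [hu]
      | cons d ds =>
        rw [hd] at hlen
        have hdn : d ≠ '\n' := by
          intro he
          exact h ((List.dropWhile_sublist (· == '#')).mem (by rw [hd, he]; simp))
        have hlt : k < ('#'::t).length := by simp only [List.length_cons] at hlen ⊢; omega
        have hclose : '#'::t = ('#'::t).takeWhile (· == '#') ++ ([] : List Char) ++ (d :: ds) := by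
          conv_lhs => rw [← hsplit, hd]
          simp
        by_cases h6 : k ≤ 6
        · by_cases hsp : d = ' '
          · have hC3 : ¬ (1 ≤ k ∧ k ≤ 6 ∧ headOkB (d :: ds) = true) := by simp [headOkB, hsp]
            have hC2 : ¬ (k < ('#'::t).length ∧ ((d :: ds).head? ≠ some ' ')) := by simp [hsp]
            rw [if_neg hC3, if_pos (⟨by omega, h6⟩ : 0 < k ∧ k ≤ 6), if_neg hC2]
            exact hclose
          · have hC3 : 1 ≤ k ∧ k ≤ 6 ∧ headOkB (d :: ds) = true := ⟨hk1, h6, by simp [headOkB, hsp, hdn]⟩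
            have hC2 : k < ('#'::t).length ∧ ((d :: ds).head? ≠ some ' ') := ⟨hlt, by simp [hsp]⟩
            rw [if_pos hC3, if_pos (⟨by omega, h6⟩ : 0 < k ∧ k ≤ 6), if_pos hC2]
            rw [← hrepl, PySem.List.slice_from ('#'::t) (a := (k : Int)) (by omega)]
            have hdrop : List.drop ((k : Int)).toNat ('#'::t) = d :: ds := by
              rw [show ((k : Int)).toNat = k by omega]
              conv_lhs => rw [← hsplit, hk, List.drop_left]
              rw [hd]
            rw [hdrop]
        · have hC3 : ¬ (1 ≤ k ∧ k ≤ 6 ∧ headOkB (d :: ds) = true) := by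
            exact fun hh => h6 hh.2.1
          rw [if_neg hC3, if_neg (fun hh => h6 hh.2 : ¬ (0 < k ∧ k ≤ 6))]
          exact hclose
    · have hbe : (c == '#') = false := by simp [hc]
      have ht : (c::t).takeWhile (· == '#') = [] := by simp [hbe]
      have hd : (c::t).dropWhile (· == '#') = c::t := List.dropWhile_cons_of_neg (by simp [hbe])
      rw [ht, hd]
      simp only [List.length_nil, List.nil_append]
      rw [if_neg (by omega)]
      simp only [fixLineA, PySem.Chars.lstrip, PySem.Chars.startswith]
      rw [hd]
      split_ifs with h1 h2 <;> first | rfl | omega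

theorem dropWhile_head_false {α : Type} (p : α → Bool) (l : List α) (x : α) (xs : List α)
    (h : l.dropWhile p = x :: xs) : p x = false := by
  induction l with
  | nil => simp at h
  | cons a l ih =>
    rw [List.dropWhile_cons] at h
    by_cases hp : p a = true
    · exact ih (by simpa [hp] using h)
    · simp [hp] at h
      rw [← h.1]
      simpa using hp

theorem goB_eq : ∀ (n : Nat) (cs : List Char), cs.length ≤ n →
    goB cs = PySem.Chars.join ['\n'] ((mySplit cs).map fixLineA) := by
  intro n
  induction n with
  | zero =>
    intro cs h
    have hnil : cs = [] := List.eq_nil_of_length_eq_zero (Nat.le_zero.mp h)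
    subst hnil
    rw [goB]
    simp [emitB, mySplit, fixLineA, PySem.Chars.lstrip, PySem.Chars.startswith,
      PySem.Chars.join, headOkB, List.intercalate]
  | succ n ih =>
    intro cs h
    have hnu : '\n' ∉ cs.takeWhile (fun c => c != '\n') := fun hm => by
      have := List.mem_takeWhile_imp hm; simp at this
    cases hdw : cs.dropWhile (fun c => c != '\n') with
    | nil =>
      have hcs := List.takeWhile_append_dropWhile (p := fun c => c != '\n') (l := cs)
      rw [hdw, List.append_nil] at hcs
      have hncs : '\n' ∉ cs := hcs ▸ hnu
      rw [mySplit_no_newline cs hncs]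
      simp only [List.map_cons, List.map_nil]
      rw [PySem.Chars.join_singleton]
      rw [fixA_eq cs hncs]
      rw [goB]
      rw [emitB_no_newline _ (fun hm => hncs ((List.dropWhile_sublist _).mem hm))]
    | cons c v =>
      have hc : c = '\n' := by
        have := dropWhile_head_false _ _ _ _ hdw
        simpa using this
      subst hc
      have hcs := List.takeWhile_append_dropWhile (p := fun c => c != '\n') (l := cs)
      rw [hdw] at hcs
      have hlenv : v.length ≤ n := by
        have := congrArg List.length hcs
        simp at this
        omega
      rw [← hcs, mySplit_append _ v hnu]
      rw [goB]
      rw [takeWhile_append_stop _ _ v '\n' (by simp)]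
      rw [dropWhile_append_stop _ _ v '\n' (by simp)]
      rw [emitB_append _ v (fun hm => hnu ((List.dropWhile_sublist _).mem hm))]
      rw [headOkB_append]
      rw [ih v hlenv]
      simp only [List.map_cons]
      cases hms : mySplit v with
      | nil => exact absurd hms (mySplit_ne_nil v)
      | cons b tl =>
        simp only [List.map_cons]
        rw [PySem.Chars.join_cons_cons, fixA_eq _ hnu]
        simp [List.append_assoc]

-- ===== VERDICT (by name: the statement is the Claim_ definition above) =====
theorem normalize_markdown_spec : Claim_equal_normalize_markdown := by
  intro text _
  unfold Spec_normalize_markdown normalize_markdown normalize_markdown_alt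
  simp only [splitOn_newline, foldl_append_map, List.nil_append]
  rw [goB_eq text.toList.length text.toList le_rfl]
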